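-- pv_equiv track=rewrite | github.com/hsh814/pacfix-python | src/utils.py | parse_valuations_uni
-- ===== SOURCE A (Python) =====
-- from typing import List, Set, Dict, Tuple
--
-- def parse_valuations_uni(neg: List[str], pos: List[str]) -> List[Dict[int, int]]:
--     neg_vals = list()
--     pos_vals = list()
--     for valuation in neg:
--         groups: List[Dict[int, int]] = list()
--         val_map = dict()
--         for line in valuation.split("\n"):
--             if line.startswith("#") or len(line) < 3:
--                 continue
--             if line.startswith("----------------------------"):
--                 groups.append(val_map)
--                 val_map = dict()
--             elif line.startswith("__valuation:"):
--                 value_str = line.removeprefix("__valuation:").strip()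
--                 tokens = value_str.split()
--                 id = tokens[4].strip()
--                 val = tokens[5].strip()
--                 val_map[int(id)] = int(val)
--         # Only last one is negative
--         for i in range(len(groups)):
--             val_map = groups[i]
--             if i < len(groups) - 1:
--                 pos_vals.append(val_map)
--             else:
--                 neg_vals.append(val_map)
--     for valuation in pos:
--         groups: List[Dict[int, int]] = list()
--         in_group = False
--         val_map = dict()
--         for line in valuation.split("\n"):
--             if line.startswith("#") or len(line) < 3:
--                 continue
--             if line.startswith("----------------------------"):
--                 groups.append(val_map)
--                 val_map = dict()
--             elif line.startswith("__valuation:"):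
--                 value_str = line[len("__valuation:"):].strip()
--                 tokens = value_str.split()
--                 id = tokens[4].strip()
--                 val = tokens[5].strip()
--                 val_map[int(id)] = int(val)
--         for val_map in groups:
--             pos_vals.append(val_map)
--     return neg_vals, pos_vals
-- ===== SOURCE B (Python) =====
-- # B: segment-first decomposition — split each valuation into delimiter-closed
-- # segments (built back-to-front), parse each closed segment into a dict, then
-- # distribute groups (last group of each neg valuation is negative).
-- from typing import List, Dict, Tuple
--
--
-- def _closed_segments(lines):
--     # closed segments of the suffix seen so far, built back-to-front;
--     # the trailing unterminated segment is never started, hence discarded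
--     segs = []
--     for head in reversed(lines):
--         if head.startswith("----------------------------"):
--             segs.insert(0, [])
--         elif segs:
--             segs[0].insert(0, head)
--     return segs
--
--
-- def _parse_seg(seg):
--     m = {}
--     for line in seg:
--         if line.startswith("__valuation:"):
--             tokens = line[len("__valuation:"):].strip().split()
--             m[int(tokens[4].strip())] = int(tokens[5].strip())
--     return m
--
--
-- def _groups(text):
--     return [_parse_seg(s) for s in _closed_segments(text.split("\n"))]
--
--
-- def parse_valuations_uni(neg: List[str], pos: List[str]):
--     neg_groups = [_groups(v) for v in neg]
--     neg_vals = [g[-1] for g in neg_groups if g]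
--     pos_vals = [m for g in neg_groups for m in g[:-1]] + \
--                [m for v in pos for m in _groups(v)]
--     return neg_vals, pos_vals
-- ===== Notes on version B (the rewrite author's own statement) =====
-- stated objective: alternative
-- what changed: A interleaves parsing and distribution in one stateful pass per valuation (dict accumulator flushed at each delimiter line, then an index loop splitting groups); B decomposes the task: it first partitions the lines into delimiter-closed segments (built back-to-front over reversed lines, discarding the trailing unterminated segment), parses each segment independently into a dict, and then distributes whole group lists with slicing/comprehensions.
import Mathlib
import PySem

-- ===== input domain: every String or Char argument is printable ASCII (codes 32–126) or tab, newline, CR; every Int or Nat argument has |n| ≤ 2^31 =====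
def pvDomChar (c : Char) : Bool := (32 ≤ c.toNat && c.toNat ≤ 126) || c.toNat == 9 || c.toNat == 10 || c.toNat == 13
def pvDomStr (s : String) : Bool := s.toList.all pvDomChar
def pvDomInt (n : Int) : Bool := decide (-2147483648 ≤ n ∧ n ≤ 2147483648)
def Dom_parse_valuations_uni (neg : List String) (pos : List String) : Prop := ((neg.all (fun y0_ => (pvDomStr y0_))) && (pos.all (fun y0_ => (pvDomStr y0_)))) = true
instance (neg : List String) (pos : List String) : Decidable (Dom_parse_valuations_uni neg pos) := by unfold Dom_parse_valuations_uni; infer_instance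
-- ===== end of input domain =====

-- B re-implements A by a different decomposition (segment-first: split lines into
-- delimiter-closed segments, parse each, then distribute); same return value, no speed claim.

-- ===== PORT A =====
-- valuation.split("\n"): the separator is non-empty, so Python's split? is always `some`
def pvLines (v : String) : List String := (PySem.Str.split? v "\n").getD []

-- the body of A's inner `for line in valuation.split("\n")` loop (identical in both of A's loops);
-- `line.removeprefix("__valuation:")` / `line[len("__valuation:"):]` = slice from 12 (startswith holds in that branch);
-- the `_, _ => st` fallbacks are where Python raises IndexError/ValueError — excluded by Pre_.
def pvStepA (st : List (PySem.Dict Int Int) × PySem.Dict Int Int) (line : String) :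
    List (PySem.Dict Int Int) × PySem.Dict Int Int :=
  if PySem.Str.startswith line "#" || decide (PySem.Str.len line < 3) then st
  else if PySem.Str.startswith line "----------------------------" then (st.1 ++ [st.2], PySem.Dict.empty)
  else if PySem.Str.startswith line "__valuation:" then
    let value_str := PySem.Str.strip (PySem.Str.slice line (some 12) none)
    let tokens := PySem.Str.split₀ value_str
    match PySem.List.pyGet? tokens 4, PySem.List.pyGet? tokens 5 with
    | some idt, some valt =>
      (match PySem.Int.ofStr? (PySem.Str.strip idt), PySem.Int.ofStr? (PySem.Str.strip valt) with
       | some i, some v => (st.1, st.2.insert i v)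
       | _, _ => st)
    | _, _ => st
  else st

-- `for i in range(len(groups)): … groups[i] …` ported as the enumerate fold
def pvNegStep (acc : List (List (Int × Int)) × List (List (Int × Int))) (valuation : String) :
    List (List (Int × Int)) × List (List (Int × Int)) :=
  let groups := ((pvLines valuation).foldl pvStepA ([], PySem.Dict.empty)).1
  (PySem.List.enumerate groups 0).foldl
    (fun acc2 p =>
      if p.1 < (groups.length : Int) - 1 then (acc2.1, acc2.2 ++ [PySem.Dict.items p.2])
      else (acc2.1 ++ [PySem.Dict.items p.2], acc2.2)) acc

def pvPosStep (pv : List (List (Int × Int))) (valuation : String) : List (List (Int × Int)) :=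
  let groups := ((pvLines valuation).foldl pvStepA ([], PySem.Dict.empty)).1
  groups.foldl (fun pv g => pv ++ [PySem.Dict.items g]) pv

def parse_valuations_uni (neg : List String) (pos : List String) :
    (List (List (Int × Int))) × (List (List (Int × Int))) :=
  let np := neg.foldl pvNegStep ([], [])
  (np.1, pos.foldl pvPosStep np.2)

-- ===== PORT B =====
-- one `__valuation:` line updates the segment's dict (same raising corners as A, excluded by Pre_)
def pvLineB (m : PySem.Dict Int Int) (line : String) : PySem.Dict Int Int :=
  if PySem.Str.startswith line "__valuation:" then
    let tokens := PySem.Str.split₀ (PySem.Str.strip (PySem.Str.slice line (some 12) none))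
    match PySem.List.pyGet? tokens 4, PySem.List.pyGet? tokens 5 with
    | some idt, some valt =>
      (match PySem.Int.ofStr? (PySem.Str.strip idt), PySem.Int.ofStr? (PySem.Str.strip valt) with
       | some i, some v => m.insert i v
       | _, _ => m)
    | _, _ => m
  else m

-- _closed_segments: built back-to-front over reversed(lines) = foldr
def pvClosedSegs (lines : List String) : List (List String) :=
  lines.foldr
    (fun head segs =>
      if PySem.Str.startswith head "----------------------------" then [] :: segs
      else match segs with
        | [] => []
        | s :: rest => (head :: s) :: rest) []

def pvParseSeg (seg : List String) : PySem.Dict Int Int := seg.foldl pvLineB PySem.Dict.empty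

def pvGroups (text : String) : List (List (Int × Int)) :=
  (pvClosedSegs (pvLines text)).map (fun s => (pvParseSeg s).items)

def parse_valuations_uni_alt (neg : List String) (pos : List String) :
    (List (List (Int × Int))) × (List (List (Int × Int))) :=
  let negGroups := neg.map pvGroups
  (negGroups.filterMap List.getLast?,
   negGroups.flatMap List.dropLast ++ pos.flatMap pvGroups)

-- ===== PRECONDITION & SPEC =====
-- a `__valuation:` line is well-formed when its payload has ≥ 6 whitespace tokens and
-- tokens 4 and 5 parse as Python ints; on any other `__valuation:` line A raises
def pvLineOk (line : String) : Bool :=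
  !(PySem.Str.startswith line "__valuation:") ||
    (let toks := PySem.Str.split₀ (PySem.Str.strip (PySem.Str.slice line (some 12) none))
     decide (6 ≤ toks.length) &&
     (PySem.Int.ofStr? (PySem.Str.strip (toks.getD 4 ""))).isSome &&
     (PySem.Int.ofStr? (PySem.Str.strip (toks.getD 5 ""))).isSome)

-- Pre_ = exactly the inputs on which A returns: every `__valuation:` line anywhere is
-- well-formed (otherwise A raises IndexError/ValueError at tokens[4]/tokens[5]/int())
def Pre_parse_valuations_uni (neg : List String) (pos : List String) : Prop :=
  ((neg ++ pos).all (fun v => (pvLines v).all pvLineOk)) = true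
instance (neg : List String) (pos : List String) : Decidable (Pre_parse_valuations_uni neg pos) := by
  unfold Pre_parse_valuations_uni; infer_instance

def pvWitness_parse_valuations_uni : List String × List String :=
  (["__valuation: w x y z 7 -3\n----------------------------\n#c\n__valuation: a b c d 1 2\n----------------------------"],
   ["__valuation: p q r s 5 5\n----------------------------\ntrailing junk"])

def Spec_parse_valuations_uni (neg : List String) (pos : List String)
    (out : (List (List (Int × Int))) × (List (List (Int × Int)))) : Prop :=
  out = parse_valuations_uni_alt neg pos
instance (neg : List String) (pos : List String) (out : (List (List (Int × Int))) × (List (List (Int × Int)))) :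
    Decidable (Spec_parse_valuations_uni neg pos out) := by
  unfold Spec_parse_valuations_uni; infer_instance

-- ===== CLAIM (what is proved, stated in full; the proofs are below) =====
def Claim_equal_parse_valuations_uni : Prop :=
  ∀ (neg : List String) (pos : List String), Dom_parse_valuations_uni neg pos →
    Pre_parse_valuations_uni neg pos →
    Spec_parse_valuations_uni neg pos (parse_valuations_uni neg pos)

-- ===== LEMMAS AND PROOFS =====

-- prefix facts
theorem pv_prefix_of_sw {l p : String} (h : PySem.Str.startswith l p = true) : p.toList <+: l.toList := by
  rw [PySem.Str.startswith_eq] at h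
  exact (PySem.Chars.startswith_iff _ _).1 h

theorem pv_sw_head {l p : String} (h : PySem.Str.startswith l p = true)
    (c : Char) (hc : p.toList.head? = some c) : l.toList.head? = some c := by
  obtain ⟨t, ht⟩ := pv_prefix_of_sw h
  cases hp : p.toList with
  | nil => rw [hp] at hc; simp at hc
  | cons a as =>
    rw [hp] at hc ht
    rw [← ht]
    simpa using hc

theorem pv_sw_len {l p : String} (h : PySem.Str.startswith l p = true) :
    p.toList.length ≤ l.toList.length :=
  (pv_prefix_of_sw h).length_le

theorem pv_notskip_of_delim {l : String}
    (h : PySem.Str.startswith l "----------------------------" = true) :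
    (PySem.Str.startswith l "#" || decide (PySem.Str.len l < 3)) = false := by
  have hh := pv_sw_head h '-' (by decide)
  have hl := pv_sw_len h
  simp only [Bool.or_eq_false_iff]
  constructor
  · by_contra hx
    rw [Bool.not_eq_false] at hx
    have := pv_sw_head hx '#' (by decide)
    rw [hh] at this
    simp at this
  · have h28 : (28 : Nat) ≤ l.toList.length := by
      have : ("----------------------------" : String).toList.length = 28 := by decide
      omega
    rw [PySem.Str.len_eq]
    simp only [decide_eq_false_iff_not]
    omega

theorem pv_notskip_of_val {l : String}
    (h : PySem.Str.startswith l "__valuation:" = true) :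
    (PySem.Str.startswith l "#" || decide (PySem.Str.len l < 3)) = false := by
  have hh := pv_sw_head h '_' (by decide)
  have hl := pv_sw_len h
  simp only [Bool.or_eq_false_iff]
  constructor
  · by_contra hx
    rw [Bool.not_eq_false] at hx
    have := pv_sw_head hx '#' (by decide)
    rw [hh] at this
    simp at this
  · have h12 : (12 : Nat) ≤ l.toList.length := by
      have : ("__valuation:" : String).toList.length = 12 := by decide
      omega
    rw [PySem.Str.len_eq]
    simp only [decide_eq_false_iff_not]
    omega

-- the closed segments of the remaining lines, the first one continuing from dict d
def pvSegsD (d : PySem.Dict Int Int) : List String → List (PySem.Dict Int Int)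
  | [] => []
  | l :: ls =>
    if PySem.Str.startswith l "----------------------------" then d :: pvSegsD PySem.Dict.empty ls
    else pvSegsD (pvLineB d l) ls

-- A's loop body, re-read through B's per-line update
theorem pvStepA_eq (st : List (PySem.Dict Int Int) × PySem.Dict Int Int) (line : String) :
    pvStepA st line =
      if PySem.Str.startswith line "----------------------------" then (st.1 ++ [st.2], PySem.Dict.empty)
      else (st.1, pvLineB st.2 line) := by
  by_cases hd : PySem.Str.startswith line "----------------------------" = true
  · have hs := pv_notskip_of_delim hd
    simp only [pvStepA, hs, hd, Bool.false_eq_true, if_false, if_true]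
  · rw [if_neg hd]
    by_cases hv : PySem.Str.startswith line "__valuation:" = true
    · have hs := pv_notskip_of_val hv
      rw [Bool.not_eq_true] at hd
      simp only [pvStepA, pvLineB, hs, hd, hv, Bool.false_eq_true, if_false]
      rcases PySem.List.pyGet? (PySem.Str.split₀ (PySem.Str.strip (PySem.Str.slice line (some 12) none))) 4 with _ | idt <;>
        rcases h5 : PySem.List.pyGet? (PySem.Str.split₀ (PySem.Str.strip (PySem.Str.slice line (some 12) none))) 5 with _ | valt <;>
        simp
      rcases PySem.Int.ofStr? (PySem.Str.strip idt) with _ | i <;>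
        rcases PySem.Int.ofStr? (PySem.Str.strip valt) with _ | v <;> simp
    · rw [Bool.not_eq_true] at hd hv
      by_cases hs : (PySem.Str.startswith line "#" || decide (PySem.Str.len line < 3)) = true
      · simp only [pvStepA, pvLineB, hs, hd, hv, Bool.false_eq_true, if_false, if_true]
      · rw [Bool.not_eq_true] at hs
        simp only [pvStepA, pvLineB, hs, hd, hv, Bool.false_eq_true, if_false]

theorem pv_foldA_eq (lines : List String) :
    ∀ (gs : List (PySem.Dict Int Int)) (d : PySem.Dict Int Int),
      (lines.foldl pvStepA (gs, d)).1 = gs ++ pvSegsD d lines := by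
  induction lines with
  | nil => intro gs d; simp [pvSegsD]
  | cons l ls ih =>
    intro gs d
    rw [List.foldl_cons, pvStepA_eq]
    by_cases hd : PySem.Str.startswith l "----------------------------" = true
    · rw [if_pos hd, ih]
      simp only [pvSegsD]
      rw [if_pos hd, List.append_assoc, List.singleton_append]
    · rw [if_neg hd, ih]
      simp only [pvSegsD]
      rw [if_neg hd]

theorem pvClosedSegs_cons (l : String) (ls : List String) :
    pvClosedSegs (l :: ls) =
      if PySem.Str.startswith l "----------------------------" then [] :: pvClosedSegs ls
      else match pvClosedSegs ls with
        | [] => []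
        | s :: rest => (l :: s) :: rest := rfl

theorem pv_segsD_eq (lines : List String) :
    ∀ d, pvSegsD d lines =
      match pvClosedSegs lines with
      | [] => []
      | s :: rest => s.foldl pvLineB d :: rest.map pvParseSeg := by
  induction lines with
  | nil => intro d; simp [pvSegsD, pvClosedSegs]
  | cons l ls ih =>
    intro d
    rw [pvClosedSegs_cons]
    by_cases hd : PySem.Str.startswith l "----------------------------" = true
    · rw [if_pos hd]
      simp only [pvSegsD]
      rw [if_pos hd, ih PySem.Dict.empty]
      rcases hc : pvClosedSegs ls with _ | ⟨s, rest⟩ <;> simp [pvParseSeg]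
    · rw [if_neg hd]
      simp only [pvSegsD]
      rw [if_neg hd, ih (pvLineB d l)]
      rcases hc : pvClosedSegs ls with _ | ⟨s, rest⟩ <;> simp

theorem pv_segsD_empty (lines : List String) :
    pvSegsD PySem.Dict.empty lines = (pvClosedSegs lines).map pvParseSeg := by
  rw [pv_segsD_eq]
  rcases pvClosedSegs lines with _ | ⟨s, rest⟩ <;> simp [pvParseSeg]

theorem pv_groups_eq (v : String) :
    (((pvLines v).foldl pvStepA ([], PySem.Dict.empty)).1).map PySem.Dict.items
      = pvGroups v := by
  rw [pv_foldA_eq, List.nil_append, pv_segsD_empty, pvGroups, List.map_map]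
  rfl

theorem pv_enumFold (n : Int) (gs : List (PySem.Dict Int Int)) :
    ∀ (s : Int) (nv pv : List (List (Int × Int))), s + gs.length = n →
      (PySem.List.enumerate gs s).foldl
        (fun acc2 p =>
          if p.1 < n - 1 then (acc2.1, acc2.2 ++ [PySem.Dict.items p.2])
          else (acc2.1 ++ [PySem.Dict.items p.2], acc2.2)) (nv, pv)
      = (nv ++ (gs.map PySem.Dict.items).getLast?.toList,
         pv ++ (gs.map PySem.Dict.items).dropLast) := by
  induction gs with
  | nil => intro s nv pv h; simp [PySem.List.enumerate_nil]
  | cons g rest ih =>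
    intro s nv pv h
    rw [PySem.List.enumerate_cons, List.foldl_cons]
    cases rest with
    | nil =>
      have hn : ¬ ((s, g).1 < n - 1) := by simp at h ⊢; omega
      rw [if_neg hn]
      simp [PySem.List.enumerate_nil]
    | cons r rs =>
      have hn : (s, g).1 < n - 1 := by
        simp only [List.length_cons] at h
        push_cast at h ⊢
        omega
      rw [if_pos hn]
      have hrec := ih (s + 1) nv (pv ++ [PySem.Dict.items g]) (by
        simp only [List.length_cons] at h ⊢
        push_cast at h ⊢
        omega)
      simp only at hrec
      rw [hrec]
      simp [List.getLast?_cons_cons, List.append_assoc]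

theorem pvNegStep_eq (acc : List (List (Int × Int)) × List (List (Int × Int))) (v : String) :
    pvNegStep acc v = (acc.1 ++ (pvGroups v).getLast?.toList, acc.2 ++ (pvGroups v).dropLast) := by
  have h := pv_enumFold ((((pvLines v).foldl pvStepA ([], PySem.Dict.empty)).1.length : Int))
      (((pvLines v).foldl pvStepA ([], PySem.Dict.empty)).1) 0 acc.1 acc.2 (by simp)
  rw [← pv_groups_eq v]
  unfold pvNegStep
  simpa using h

theorem pv_map_items_fold (gs : List (PySem.Dict Int Int)) :
    ∀ pv : List (List (Int × Int)),
      gs.foldl (fun pv g => pv ++ [PySem.Dict.items g]) pv = pv ++ gs.map PySem.Dict.items := by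
  induction gs with
  | nil => intro pv; simp
  | cons g rest ih => intro pv; simp [ih, List.append_assoc]

theorem pvPosStep_eq (pv : List (List (Int × Int))) (v : String) :
    pvPosStep pv v = pv ++ pvGroups v := by
  unfold pvPosStep
  rw [pv_map_items_fold, pv_groups_eq]

theorem pv_negFold (negs : List String) :
    ∀ (nv pv : List (List (Int × Int))),
      negs.foldl pvNegStep (nv, pv)
        = (nv ++ negs.flatMap (fun v => (pvGroups v).getLast?.toList),
           pv ++ negs.flatMap (fun v => (pvGroups v).dropLast)) := by
  induction negs with
  | nil => intro nv pv; simp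
  | cons v vs ih =>
    intro nv pv
    rw [List.foldl_cons, pvNegStep_eq, ih]
    simp [List.append_assoc]

theorem pv_posFold (ps : List String) :
    ∀ (pv : List (List (Int × Int))),
      ps.foldl pvPosStep pv = pv ++ ps.flatMap pvGroups := by
  induction ps with
  | nil => intro pv; simp
  | cons v vs ih =>
    intro pv
    rw [List.foldl_cons, pvPosStep_eq, ih]
    simp [List.append_assoc]

theorem pv_filterMap_eq_flatMap {α β : Type} (f : α → Option β) (l : List α) :
    l.filterMap f = l.flatMap (fun x => (f x).toList) := by
  induction l with
  | nil => rfl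
  | cons a r ih => cases h : f a <;> simp [h, ih]

-- ===== VERDICT (by name: the statement is the Claim_ definition above) =====
theorem parse_valuations_uni_spec : Claim_equal_parse_valuations_uni := by
  intro neg pos _ _
  unfold Spec_parse_valuations_uni parse_valuations_uni parse_valuations_uni_alt
  simp only [pv_negFold, pv_posFold, List.nil_append,
    List.flatMap_map, List.filterMap_map]
  rw [pv_filterMap_eq_flatMap]
  simp
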